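-- pv_equiv track=rewrite | github.com/ffancer/study_with_codewars | 7 kyu Dominant array elements.py | solve
-- ===== SOURCE A (Python) =====
-- def solve(arr):
--     a = 0
--     lst = []
--
--     while a != len(arr):
--         if arr[a] < max(arr[a:]):
--             a += 1
--         else:
--             lst.append(arr[a])
--             a += 1
--
--     return lst
-- ===== SOURCE B (Python) =====
-- def solve(arr):
--     # single right-to-left pass tracking the running maximum; O(n)
--     out = []
--     m = None
--     for x in reversed(arr):
--         if m is None or x >= m:
--             out.append(x)
--             m = x
--     out.reverse()
--     return out
-- ===== Notes on version B (the rewrite author's own statement) =====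
-- stated objective: faster
-- what changed: Replaces the per-index max(arr[a:]) rescans with one right-to-left pass that tracks the running maximum, collects the suffix maxima and reverses at the end.
import Mathlib
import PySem

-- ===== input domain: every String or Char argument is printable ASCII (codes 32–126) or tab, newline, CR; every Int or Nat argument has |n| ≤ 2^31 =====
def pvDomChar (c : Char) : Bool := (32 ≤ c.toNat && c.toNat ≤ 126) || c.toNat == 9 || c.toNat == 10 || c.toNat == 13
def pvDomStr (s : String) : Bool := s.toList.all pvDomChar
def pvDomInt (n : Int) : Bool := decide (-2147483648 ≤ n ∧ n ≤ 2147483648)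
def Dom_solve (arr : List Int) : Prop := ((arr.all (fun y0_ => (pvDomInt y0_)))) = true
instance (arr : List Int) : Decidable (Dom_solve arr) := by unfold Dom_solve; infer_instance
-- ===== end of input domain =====

-- B: one right-to-left pass tracking the running maximum (suffix maxima), instead of A's max(arr[a:]) rescan per index.
-- ===== PORT A =====
-- Python max over a nonempty list x::xs (value only; on Int ties are the same value)
def pyMax1 (x : Int) (xs : List Int) : Int := xs.foldl max x

-- A's while loop walks index a through arr, testing arr[a] < max(arr[a:]); the
-- remaining suffix arr[a:] is the recursion argument here, step for step.
def solve (arr : List Int) : List Int :=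
  match arr with
  | [] => []
  | x :: xs => if x < pyMax1 x xs then solve xs else x :: solve xs

-- ===== PORT B =====
-- one step of B's loop body: state (m, out); append to out, update m
def altStep (st : Option Int × List Int) (x : Int) : Option Int × List Int :=
  match st.1 with
  | none => (some x, st.2 ++ [x])
  | some m => if m ≤ x then (some x, st.2 ++ [x]) else st

def solve_alt (arr : List Int) : List Int :=
  ((arr.reverse.foldl altStep (none, [])).2).reverse

-- ===== PRECONDITION & SPEC =====
def Spec_solve (arr : List Int) (out : List Int) : Prop := out = solve_alt arr
instance (arr : List Int) (out : List Int) : Decidable (Spec_solve arr out) := by unfold Spec_solve; infer_instance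

-- ===== CLAIM (what is proved, stated in full; the proofs are below) =====
def Claim_equal_solve : Prop := ∀ (arr : List Int), Dom_solve arr → Spec_solve arr (solve arr)

-- ===== LEMMAS AND PROOFS =====

-- ===== VERDICT (by name: the statement is the Claim_ definition above) =====
def G (arr : List Int) : Option Int × List Int := arr.foldr (fun x st => altStep st x) (none, [])

lemma foldl_max_comm (l : List Int) : ∀ a b : Int, List.foldl max (max a b) l = max a (List.foldl max b l) := by
  induction l with
  | nil => intro a b; simp
  | cons c l ih =>
      intro a b
      simp only [List.foldl_cons, max_assoc]
      exact ih a (max b c)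

lemma pyMax1_cons (x y : Int) (ys : List Int) : pyMax1 x (y :: ys) = max x (pyMax1 y ys) := by
  simp only [pyMax1, List.foldl_cons]
  exact foldl_max_comm ys x y

lemma G_spec (xs : List Int) : ∀ x : Int, G (x :: xs) = (some (pyMax1 x xs), (solve (x :: xs)).reverse) := by
  induction xs with
  | nil =>
      intro x
      simp [G, altStep, solve, pyMax1]
  | cons y ys ih =>
      intro x
      have hG : G (x :: y :: ys) = altStep (G (y :: ys)) x := rfl
      rw [hG, ih y]
      by_cases h : pyMax1 y ys ≤ x
      · have hmax : max x (pyMax1 y ys) = x := max_eq_left h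
        simp [altStep, solve, pyMax1_cons, h]
      · have hlt : x < pyMax1 y ys := lt_of_not_ge h
        have hmax : max x (pyMax1 y ys) = pyMax1 y ys := max_eq_right (le_of_lt hlt)
        simp [altStep, solve, pyMax1_cons, h, hmax, hlt]

lemma solve_alt_eq_G (arr : List Int) : solve_alt arr = ((G arr).2).reverse := by
  simp [solve_alt, G, List.foldl_reverse]

-- ===== VERDICT (by name: the statement is the Claim_ definition above) =====
theorem solve_spec : Claim_equal_solve := by
  intro arr _
  unfold Spec_solve
  rw [solve_alt_eq_G]
  cases arr with
  | nil => rfl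
  | cons x xs => rw [G_spec xs x]; simp
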